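-- pv_equiv track=rewrite | github.com/RobisonTorres/Python_Repository | Old_Projects/Data_Analyzes_Lottery/analyzing.py | frequency_range
-- ===== SOURCE A (Python) =====
-- def frequency_range(data):
--
--     # This function groups the numbers in 5 different
--     # ranges and shows the most and least drawn.
--     fre_ranges = {}
--     for x in range(1, 26, 5):
--         count_numbers = str(len([n for n in data if n in range(x, x + 5)]))
--         fre_ranges[f'{x}-{x + 4}'] = count_numbers
--
--     # Ranges most an least drawn.
--     fre_ranges_sorted = sorted(fre_ranges.items(),key=lambda x:int(x[1]))[::-1]
--     ranges = list(dict(fre_ranges_sorted).keys())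
--     return f'Range of numbers most drawn - {[ranges[0]]}. '\
--            f'Range of numbers least drawn - {[ranges[-1]]}.'
-- ===== SOURCE B (Python) =====
-- def frequency_range(data):
--     # Build a lookup table number -> range label, then count in ONE pass over data.
--     labels = ['1-5', '6-10', '11-15', '16-20', '21-25']
--     table = {}
--     for i, lab in enumerate(labels):
--         for n in range(5 * i + 1, 5 * i + 6):
--             table[n] = lab
--     counts = {lab: 0 for lab in labels}
--     for n in data:
--         lab = table.get(n)
--         if lab is not None:
--             counts[lab] = counts[lab] + 1
--     fre_ranges = {lab: str(c) for lab, c in counts.items()}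
--     ranges = [k for k, _ in sorted(fre_ranges.items(), key=lambda p: int(p[1]))[::-1]]
--     return (f'Range of numbers most drawn - {[ranges[0]]}. '
--             f'Range of numbers least drawn - {[ranges[-1]]}.')
-- ===== Notes on version B (the rewrite author's own statement) =====
-- stated objective: faster
-- what changed: Replaces A's five separate filter passes over data (one per range) by a number-to-label lookup table plus a single counting pass with a dict, keeping the same sort/format tail.
import Mathlib
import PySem

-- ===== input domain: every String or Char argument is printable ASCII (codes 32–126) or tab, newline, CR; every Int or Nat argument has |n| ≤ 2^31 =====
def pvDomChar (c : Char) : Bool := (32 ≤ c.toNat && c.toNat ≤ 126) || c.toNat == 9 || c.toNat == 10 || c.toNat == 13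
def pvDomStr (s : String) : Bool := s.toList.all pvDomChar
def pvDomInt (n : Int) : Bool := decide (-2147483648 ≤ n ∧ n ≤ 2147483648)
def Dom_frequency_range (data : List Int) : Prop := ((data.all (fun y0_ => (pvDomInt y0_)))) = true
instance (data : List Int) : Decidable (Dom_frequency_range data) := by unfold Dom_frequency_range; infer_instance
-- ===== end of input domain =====

-- B replaces A's five filter passes over `data` (one per range) by a number→label lookup table and ONE counting pass (measured faster; return value only).

-- ===== PORT A =====
def frequency_range (data : List Int) : String :=
  -- fre_ranges built by the loop 'for x in range(1, 26, 5)'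
  let fre_ranges : PySem.Dict String String :=
    (PySem.List.pyRange 1 26 5).foldl (fun d x =>
      -- 'n in range(x, x+5)' on ints is x ≤ n < x+5
      let count_numbers := PySem.Int.toStr ((data.filter (fun n => decide (x ≤ n ∧ n < x + 5))).length : Int)
      d.insert (PySem.Int.toStr x ++ "-" ++ PySem.Int.toStr (x + 4)) count_numbers) PySem.Dict.empty
  -- int(x[1]) never fails here (every value is str(len(..))), so the ValueError branch is dead: .getD 0
  let fre_ranges_sorted :=
    (PySem.List.slice? (PySem.List.sorted fre_ranges.items (fun p => (PySem.Int.ofStr? p.2).getD 0) false) none none (-1)).getD []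
  let ranges := (PySem.Dict.ofList fre_ranges_sorted).keys
  -- ranges always has 5 elements, so ranges[0] / ranges[-1] never raise: pyGetD; {[s]} renders as ['s'] (labels are quote-free ASCII)
  "Range of numbers most drawn - ['" ++ PySem.List.pyGetD ranges 0 "" ++ "']. " ++
  "Range of numbers least drawn - ['" ++ PySem.List.pyGetD ranges (-1) "" ++ "']."

-- ===== PORT B =====
def fr_labels : List String := ["1-5", "6-10", "11-15", "16-20", "21-25"]

-- B's number→label lookup table ('for i, lab in enumerate(labels): for n in range(5*i+1, 5*i+6): table[n] = lab')
def fr_table : PySem.Dict Int String :=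
  (PySem.List.enumerate fr_labels 0).foldl (fun t il =>
    (PySem.List.pyRange (5 * il.1 + 1) (5 * il.1 + 6) 1).foldl (fun t n => t.insert n il.2) t) PySem.Dict.empty

def frequency_range_alt (data : List Int) : String :=
  let counts0 : PySem.Dict String Int :=
    fr_labels.foldl (fun c lab => c.insert lab 0) PySem.Dict.empty
  let counts := data.foldl (fun c n =>
    match fr_table.get? n with
    -- counts[lab] exists whenever table.get(n) hits (the table's values are counts' keys), so no KeyError branch
    | some lab => c.insert lab (c.getD lab 0 + 1)
    | none => c) counts0
  let fre_ranges : PySem.Dict String String :=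
    counts.items.foldl (fun d p => d.insert p.1 (PySem.Int.toStr p.2)) PySem.Dict.empty
  let ranges :=
    ((PySem.List.slice? (PySem.List.sorted fre_ranges.items (fun p => (PySem.Int.ofStr? p.2).getD 0) false) none none (-1)).getD []).map (fun p => p.1)
  "Range of numbers most drawn - ['" ++ PySem.List.pyGetD ranges 0 "" ++ "']. " ++
  "Range of numbers least drawn - ['" ++ PySem.List.pyGetD ranges (-1) "" ++ "']."

-- ===== PRECONDITION & SPEC =====
def Spec_frequency_range (data : List Int) (out : String) : Prop := out = frequency_range_alt data
instance (data : List Int) (out : String) : Decidable (Spec_frequency_range data out) := by unfold Spec_frequency_range; infer_instance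

-- ===== CLAIM (what is proved, stated in full; the proofs are below) =====
def Claim_equal_frequency_range : Prop := ∀ (data : List Int), Dom_frequency_range data → Spec_frequency_range data (frequency_range data)

-- ===== LEMMAS AND PROOFS =====
set_option maxHeartbeats 1000000

-- the per-range tallies of `data`, and the common items list both fre_ranges dicts reduce to
def fr_cnt (data : List Int) (x : Int) : Int := ((data.filter (fun n => decide (x ≤ n ∧ n < x + 5))).length : Int)

def fr_L (data : List Int) : List (String × String) :=
  [("1-5", PySem.Int.toStr (fr_cnt data 1)), ("6-10", PySem.Int.toStr (fr_cnt data 6)),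
   ("11-15", PySem.Int.toStr (fr_cnt data 11)), ("16-20", PySem.Int.toStr (fr_cnt data 16)),
   ("21-25", PySem.Int.toStr (fr_cnt data 21))]

-- the common tail of both programs: sort by int(value), reverse, take the keys, format
def fr_out (L : List (String × String)) : String :=
  let ranges := ((PySem.List.sorted L (fun p => (PySem.Int.ofStr? p.2).getD 0) false).reverse).map (fun p => p.1)
  "Range of numbers most drawn - ['" ++ PySem.List.pyGetD ranges 0 "" ++ "']. " ++
  "Range of numbers least drawn - ['" ++ PySem.List.pyGetD ranges (-1) "" ++ "']."

theorem fr_L_keys (data : List Int) : (fr_L data).map (fun p => p.1) = fr_labels := rfl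

theorem fr_table_none (n : Int) (h : ¬ (1 ≤ n ∧ n ≤ 25)) : fr_table.get? n = none := by
  rw [PySem.Dict.get?_eq_none_iff_not_mem_keys]
  have hkeys : fr_table.keys = [1,2,3,4,5,6,7,8,9,10,11,12,13,14,15,16,17,18,19,20,21,22,23,24,25] := by decide
  rw [hkeys]; simp; omega

theorem fr_table_pred (x : Int) (hx : x ∈ [(1:Int),6,11,16,21]) (n : Int) :
    (fr_table.get? n == some (PySem.Int.toStr x ++ "-" ++ PySem.Int.toStr (x+4))) = decide (x ≤ n ∧ n < x + 5) := by
  by_cases hn : 1 ≤ n ∧ n ≤ 25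
  · obtain ⟨h1, h2⟩ := hn
    fin_cases hx <;> interval_cases n <;> decide
  · rw [fr_table_none n hn]
    fin_cases hx <;> simp <;> omega

theorem fr_table_mem (n : Int) (lab : String) (h : fr_table.get? n = some lab) : lab ∈ fr_labels := by
  have h2 : (n, lab) ∈ fr_table.items := PySem.Dict.mem_items_of_get?_eq_some _ h
  have h4 : lab ∈ fr_table.values := List.mem_map_of_mem h2
  have h3 : fr_table.values = ["1-5","1-5","1-5","1-5","1-5","6-10","6-10","6-10","6-10","6-10","11-15","11-15","11-15","11-15","11-15","16-20","16-20","16-20","16-20","16-20","21-25","21-25","21-25","21-25","21-25"] := by decide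
  rw [h3] at h4
  simp only [List.mem_cons, List.not_mem_nil, or_false] at h4
  simp only [fr_labels, List.mem_cons, List.not_mem_nil, or_false]
  tauto

theorem counts_getD (l : List Int) (c : PySem.Dict String Int) (lab : String) :
    (l.foldl (fun c n => match fr_table.get? n with
      | some lab => c.insert lab (c.getD lab 0 + 1)
      | none => c) c).getD lab 0
    = c.getD lab 0 + ((l.filter (fun n => fr_table.get? n == some lab)).length : Int) := by
  induction l generalizing c with
  | nil => simp
  | cons n t ih =>
    simp only [List.foldl_cons, List.filter_cons]
    cases h : fr_table.get? n with
    | none => simp [ih]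
    | some lab' =>
      rw [ih, PySem.Dict.getD_insert]
      by_cases he : lab = lab'
      · subst he; simp; ring
      · have : (some lab' == some lab) = false := by simp; exact fun hh => he hh.symm
        simp [this, he]

theorem counts_keys (l : List Int) (c : PySem.Dict String Int) (hk : ∀ lab ∈ fr_labels, c.contains lab = true) :
    (l.foldl (fun c n => match fr_table.get? n with
      | some lab => c.insert lab (c.getD lab 0 + 1)
      | none => c) c).keys = c.keys := by
  induction l generalizing c with
  | nil => rfl
  | cons n t ih =>
    simp only [List.foldl_cons]
    cases h : fr_table.get? n with
    | none => exact ih c hk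
    | some lab' =>
      have hc : c.contains lab' = true := hk lab' (fr_table_mem n lab' h)
      rw [ih]
      · exact PySem.Dict.keys_insert_of_contains _ _ hc
      · intro lab hl
        rw [PySem.Dict.contains_insert]
        simp [hk lab hl]

theorem keys_ofList_of_nodup (l : List (String × String)) (h : (l.map (fun p => p.1)).Nodup) :
    (PySem.Dict.ofList l).keys = l.map (fun p => p.1) := by
  have h1 := PySem.Dict.keys_foldl_insert_key l (fun p => p.1) (fun _ p => p.2) PySem.Dict.empty
  rw [show PySem.Dict.ofList l
      = l.foldl (fun (d : PySem.Dict String String) x => d.insert x.1 ((fun (_ : PySem.Dict String String) (p : String × String) => p.2) d x)) PySem.Dict.empty from rfl]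
  rw [h1]
  rw [show (PySem.Dict.empty : PySem.Dict String String).keys = [] from rfl,
      PySem.Set.update_nil_left, PySem.Set.ofList_eq_self_of_nodup _ h]

-- A's dict reduces to fr_L data (the foldl over range(1, 26, 5) unfolds definitionally)
theorem A_items (data : List Int) :
    ((PySem.List.pyRange 1 26 5).foldl (fun (d : PySem.Dict String String) x =>
      d.insert (PySem.Int.toStr x ++ "-" ++ PySem.Int.toStr (x + 4))
        (PySem.Int.toStr ((data.filter (fun n => decide (x ≤ n ∧ n < x + 5))).length : Int))) PySem.Dict.empty).items
    = fr_L data := rfl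

theorem B_str_items (v1 v2 v3 v4 v5 : Int) :
    (([("1-5",v1),("6-10",v2),("11-15",v3),("16-20",v4),("21-25",v5)]).foldl
        (fun (d : PySem.Dict String String) p => d.insert p.1 (PySem.Int.toStr p.2)) PySem.Dict.empty).items
    = [("1-5", PySem.Int.toStr v1),("6-10", PySem.Int.toStr v2),("11-15", PySem.Int.toStr v3),
       ("16-20", PySem.Int.toStr v4),("21-25", PySem.Int.toStr v5)] := rfl

-- the counting pass of B produces exactly the five tallies, in label order
theorem B_counts_items_gen (data : List Int) (c0 : PySem.Dict String Int)
    (hk : c0.keys = fr_labels) (hg0 : ∀ lab ∈ fr_labels, c0.getD lab 0 = 0)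
    (hc : ∀ lab ∈ fr_labels, c0.contains lab = true) :
    (data.foldl (fun c n => match fr_table.get? n with
      | some lab => c.insert lab (c.getD lab 0 + 1)
      | none => c) c0).items
    = [("1-5", fr_cnt data 1), ("6-10", fr_cnt data 6), ("11-15", fr_cnt data 11),
       ("16-20", fr_cnt data 16), ("21-25", fr_cnt data 21)] := by
  have hkeys : (data.foldl (fun c n => match fr_table.get? n with
      | some lab => c.insert lab (c.getD lab 0 + 1)
      | none => c) c0).keys = fr_labels := by rw [counts_keys data c0 hc]; exact hk
  have hitems := PySem.Dict.items_eq_map_keys _ (by rw [hkeys]; decide) (0 : Int)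
  rw [hkeys] at hitems
  rw [hitems]
  simp only [fr_labels, List.map_cons, List.map_nil]
  have hget : ∀ (x : Int), x ∈ [(1:Int),6,11,16,21] → ∀ (lab : String),
      lab = PySem.Int.toStr x ++ "-" ++ PySem.Int.toStr (x+4) → lab ∈ fr_labels →
      (data.foldl (fun c n => match fr_table.get? n with
        | some lab => c.insert lab (c.getD lab 0 + 1)
        | none => c) c0).getD lab 0 = fr_cnt data x := by
    intro x hx lab hlab hmem
    rw [counts_getD, hg0 lab hmem, zero_add, hlab,
        show (fun n => fr_table.get? n == some (PySem.Int.toStr x ++ "-" ++ PySem.Int.toStr (x+4)))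
        = (fun n => decide (x ≤ n ∧ n < x + 5)) from funext (fr_table_pred x hx)]
    rfl
  rw [hget 1 (by decide) "1-5" rfl (by decide), hget 6 (by decide) "6-10" rfl (by decide),
      hget 11 (by decide) "11-15" rfl (by decide), hget 16 (by decide) "16-20" rfl (by decide),
      hget 21 (by decide) "21-25" rfl (by decide)]

theorem B_counts_items (data : List Int) :
    (data.foldl (fun c n => match fr_table.get? n with
      | some lab => c.insert lab (c.getD lab 0 + 1)
      | none => c) (fr_labels.foldl (fun (c : PySem.Dict String Int) lab => c.insert lab 0) PySem.Dict.empty)).items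
    = [("1-5", fr_cnt data 1), ("6-10", fr_cnt data 6), ("11-15", fr_cnt data 11),
       ("16-20", fr_cnt data 16), ("21-25", fr_cnt data 21)] :=
  B_counts_items_gen data _ (by decide) (by decide) (by decide)

theorem rev_sorted_keys_nodup (data : List Int) :
    (((PySem.List.sorted (fr_L data) (fun p => (PySem.Int.ofStr? p.2).getD 0) false).reverse).map (fun p => p.1)).Nodup := by
  have hperm : ((PySem.List.sorted (fr_L data) (fun p => (PySem.Int.ofStr? p.2).getD 0) false).reverse).Perm (fr_L data) :=
    (List.reverse_perm _).trans (PySem.List.sorted_perm _ _ _)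
  have := (hperm.map (fun p => p.1)).nodup_iff
  rw [fr_L_keys] at this
  exact this.mpr (by decide)

theorem A_eq_out (data : List Int) : frequency_range data = fr_out (fr_L data) := by
  unfold frequency_range fr_out
  simp only []
  rw [A_items, PySem.List.slice?_none_none_neg_one, Option.getD_some,
      keys_ofList_of_nodup _ (rev_sorted_keys_nodup data)]

theorem B_eq_out (data : List Int) : frequency_range_alt data = fr_out (fr_L data) := by
  unfold frequency_range_alt fr_out
  simp only []
  rw [B_counts_items, B_str_items]
  rw [show [("1-5", PySem.Int.toStr (fr_cnt data 1)),("6-10", PySem.Int.toStr (fr_cnt data 6)),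
      ("11-15", PySem.Int.toStr (fr_cnt data 11)),("16-20", PySem.Int.toStr (fr_cnt data 16)),
      ("21-25", PySem.Int.toStr (fr_cnt data 21))] = fr_L data from rfl]
  rw [PySem.List.slice?_none_none_neg_one, Option.getD_some]

-- ===== VERDICT (by name: the statement is the Claim_ definition above) =====
theorem frequency_range_spec : Claim_equal_frequency_range := by
  intro data _
  show frequency_range data = frequency_range_alt data
  rw [A_eq_out, B_eq_out]
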